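-- pv_equiv track=rewrite | github.com/revan3/Selene-V2 | selene_audio_utils.py | decompor_grafema
-- ===== SOURCE A (Python) =====
-- DIGRAFOS = {"lh", "nh", "ch", "rr", "ss", "qu", "gu", "sc", "xc", "rh"}
--
-- def decompor_grafema(texto: str) -> list:
--     """
--     Decompõe um grafema nas suas unidades fonéticas escritas.
--     Dígrafos (lh, nh, ch, rr...) são tratados como unidade única.
--     Ex: "lha" → ["lh","a"] | "bra" → ["b","r","a"] | "amor" → ["a","m","o","r"]
--     """
--     letras = texto.lower().strip()
--     unidades = []
--     i = 0
--     while i < len(letras):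
--         if i + 1 < len(letras) and letras[i:i+2] in DIGRAFOS:
--             unidades.append(letras[i:i+2])
--             i += 2
--         elif letras[i].isalpha():
--             unidades.append(letras[i])
--             i += 1
--         else:
--             i += 1
--     return unidades
-- ===== SOURCE B (Python) =====
-- DIGRAFOS = {"lh", "nh", "ch", "rr", "ss", "qu", "gu", "sc", "xc", "rh"}
--
-- def decompor_grafema(texto: str) -> list:
--     # Streaming pass with a one-char carry: each char either completes a
--     # digraph with the pending char or flushes it (kept only if a letter).
--     # No indexing, no slicing, no lookahead.
--     unidades = []
--     pend = ""
--     for c in texto.lower().strip():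
--         if pend and pend + c in DIGRAFOS:
--             unidades.append(pend + c)
--             pend = ""
--         else:
--             if pend.isalpha():
--                 unidades.append(pend)
--             pend = c
--     if pend.isalpha():
--         unidades.append(pend)
--     return unidades
-- ===== Notes on version B (the rewrite author's own statement) =====
-- stated objective: alternative
-- what changed: Replaces A's index loop with slice lookahead (letras[i:i+2], i advancing by 1 or 2) by a streaming single pass over the characters carrying one pending char: each char either completes a digraph with the carry or flushes the carry (kept only if a letter), with a final flush after the loop; avoiding per-step slicing makes it a measured constant factor faster.
import Mathlib
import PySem

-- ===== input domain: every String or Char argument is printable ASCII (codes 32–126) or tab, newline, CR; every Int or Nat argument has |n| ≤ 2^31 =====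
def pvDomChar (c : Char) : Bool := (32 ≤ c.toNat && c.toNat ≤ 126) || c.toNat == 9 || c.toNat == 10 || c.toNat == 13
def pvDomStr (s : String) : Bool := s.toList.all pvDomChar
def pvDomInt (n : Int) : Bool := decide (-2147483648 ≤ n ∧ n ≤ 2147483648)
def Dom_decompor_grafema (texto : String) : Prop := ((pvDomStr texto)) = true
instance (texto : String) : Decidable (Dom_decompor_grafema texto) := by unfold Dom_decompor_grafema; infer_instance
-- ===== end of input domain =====

-- B replaces A's index loop with slice lookahead by a streaming pass carrying one
-- pending character (complete a digraph with it or flush it). Objective: alternative.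

-- DIGRAFOS = {"lh", "nh", "ch", "rr", "ss", "qu", "gu", "sc", "xc", "rh"}
-- (strings kept as their char lists; the module-level set, shared by both Pythons)
def pvDigrafos : PySem.Set (List Char) :=
  PySem.Set.ofList [['l','h'], ['n','h'], ['c','h'], ['r','r'], ['s','s'],
                    ['q','u'], ['g','u'], ['s','c'], ['x','c'], ['r','h']]

-- ===== PORT A =====
-- A's while-loop over the index i; letras[i:i+2] with 0 ≤ i is exactly
-- (letras.drop i).take 2 (Python slices clamp at the end).
def pvALoop (letras : List Char) (i : Nat) : List (List Char) :=
  if h : i < letras.length then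
    if i + 1 < letras.length ∧ PySem.Set.contains pvDigrafos ((letras.drop i).take 2) then
      (letras.drop i).take 2 :: pvALoop letras (i + 2)
    else if PySem.Chars.isalpha letras[i] then
      [letras[i]] :: pvALoop letras (i + 1)
    else
      pvALoop letras (i + 1)
  else []
termination_by letras.length - i

def decompor_grafema (texto : String) : List String :=
  (pvALoop (PySem.Str.strip (PySem.Str.lower texto)).toList 0).map String.ofList

-- ===== PORT B =====
-- Source B's for-loop: pend is "" or one char, ported as Option Char; "".isalpha() is False.
def pvBLoop (pend : Option Char) : List Char → List (List Char)
  | [] =>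
    -- the final flush after the loop
    match pend with
    | some p => if PySem.Chars.isalpha p then [[p]] else []
    | none => []
  | c :: rest =>
    match pend with
    | some p =>
      if PySem.Set.contains pvDigrafos [p, c] then
        [p, c] :: pvBLoop none rest
      else if PySem.Chars.isalpha p then
        [p] :: pvBLoop (some c) rest
      else
        pvBLoop (some c) rest
    | none => pvBLoop (some c) rest

def decompor_grafema_alt (texto : String) : List String :=
  (pvBLoop none (PySem.Str.strip (PySem.Str.lower texto)).toList).map String.ofList

-- ===== PRECONDITION & SPEC =====
def Spec_decompor_grafema (texto : String) (out : List String) : Prop := out = decompor_grafema_alt texto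
instance (texto : String) (out : List String) : Decidable (Spec_decompor_grafema texto out) := by unfold Spec_decompor_grafema; infer_instance

-- ===== CLAIM (what is proved, stated in full; the proofs are below) =====
def Claim_equal_decompor_grafema : Prop := ∀ (texto : String), Dom_decompor_grafema texto → Spec_decompor_grafema texto (decompor_grafema texto)

-- ===== LEMMAS AND PROOFS =====

-- restarting B with an empty carry is the same as carrying the head of the rest
lemma pvBLoop_none (l : List Char) :
    pvBLoop none l = pvBLoop l.head? (l.drop 1) := by
  cases l <;> simp [pvBLoop]

-- main invariant: A's loop from index i equals B's streaming loop carrying letras[i]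
lemma pvALoop_eq_pvBLoop (letras : List Char) (i : Nat) :
    pvALoop letras i = pvBLoop ((letras.drop i).head?) (letras.drop (i + 1)) := by
  by_cases h : i < letras.length
  · have hdrop : letras.drop i = letras[i] :: letras.drop (i + 1) :=
      List.drop_eq_getElem_cons h
    rw [pvALoop]
    simp only [h, dite_true, hdrop, List.head?_cons]
    by_cases h1 : i + 1 < letras.length
    · have hdrop1 : letras.drop (i + 1) = letras[i + 1] :: letras.drop (i + 2) :=
        List.drop_eq_getElem_cons h1
      rw [hdrop1]
      have htake : (letras[i] :: letras[i + 1] :: letras.drop (i + 2)).take 2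
          = [letras[i], letras[i + 1]] := rfl
      rw [htake]
      by_cases hd : PySem.Set.contains pvDigrafos [letras[i], letras[i + 1]] = true
      · rw [if_pos ⟨h1, hd⟩, pvALoop_eq_pvBLoop letras (i + 2)]
        simp only [pvBLoop, hd, if_true]
        rw [pvBLoop_none, List.drop_drop]
      · rw [if_neg (fun hc => hd hc.2)]
        simp only [pvBLoop, hd]
        rw [pvALoop_eq_pvBLoop letras (i + 1), hdrop1, List.head?_cons]
        by_cases ha : PySem.Chars.isalpha letras[i] = true <;> simp [ha]
    · have hnil : letras.drop (i + 1) = []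
        := List.drop_eq_nil_of_le (by omega)
      have hnil2 : letras.drop (i + 2) = [] := List.drop_eq_nil_of_le (by omega)
      rw [if_neg (by simp [h1])]
      rw [hnil]
      rw [pvALoop_eq_pvBLoop letras (i + 1), hnil, List.head?_nil, hnil2]
      by_cases ha : PySem.Chars.isalpha letras[i] = true <;> simp [ha, pvBLoop]
  · have hnil : letras.drop i = [] := List.drop_eq_nil_of_le (by omega)
    have hnil1 : letras.drop (i + 1) = [] := List.drop_eq_nil_of_le (by omega)
    rw [pvALoop]
    simp [h, hnil, hnil1, pvBLoop]
termination_by letras.length - i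
decreasing_by all_goals omega

-- ===== VERDICT (by name: the statement is the Claim_ definition above) =====
theorem decompor_grafema_spec : Claim_equal_decompor_grafema := by
  intro texto _
  unfold Spec_decompor_grafema decompor_grafema decompor_grafema_alt
  rw [pvALoop_eq_pvBLoop, pvBLoop_none]
  rfl
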